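-- pv_equiv track=rewrite | github.com/adriandalion/CMSC-162-Project-1 | filters.py | median3_gray
-- ===== SOURCE A (Python) =====
-- from typing import List, Tuple
--
-- def pad_replicate(gray: List[List[int]], r: int) -> List[List[int]]:
--     h, w = len(gray), len(gray[0])
--     out = [[0]*(w + 2*r) for _ in range(h + 2*r)]
--     for y in range(h + 2*r):
--         sy = 0 if y < r else (h-1 if y >= h+r else y - r)
--         for x in range(w + 2*r):
--             sx = 0 if x < r else (w-1 if x >= w+r else x - r)
--             out[y][x] = gray[sy][sx]
--     return out
--
-- def median3_gray(gray: List[List[int]]) -> List[List[int]]: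
--     h, w = len(gray), len(gray[0])
--     p = pad_replicate(gray, 1)
--     out = [[0]*w for _ in range(h)]
--     for y in range(h):
--         for x in range(w):
--             win = [p[y+dy][x+dx] for dy in range(3) for dx in range(3)]
--             win.sort()
--             out[y][x] = win[4]
--     return out
-- ===== SOURCE B (Python) =====
-- from typing import List
--
-- def median3_gray(gray: List[List[int]]) -> List[List[int]]:
--     h, w = len(gray), len(gray[0])
--
--     def clamp(v, n):
--         return 0 if v < 0 else (n - 1 if v >= n else v)
--
--     out = []
--     for y in range(h):
--         row = []
--         for x in range(w):
--             win = [gray[clamp(y + dy - 1, h)][clamp(x + dx - 1, w)]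
--                    for dy in range(3) for dx in range(3)]
--             # 5th smallest by rank counting (no sort): the median is the smallest
--             # window value v whose rank (number of window values <= v) is at least 5.
--             row.append(min(v for v in win if sum(u <= v for u in win) >= 5))
--         out.append(row)
--     return out
-- ===== Notes on version B (the rewrite author's own statement) =====
-- stated objective: alternative
-- what changed: B drops A's precomputed replicate-padded array and replaces sorting each 3x3 window by a rank-counting selection: the median is taken as the smallest window value whose count of window values <= it is at least 5, windows being gathered with inline clamped indices.
import Mathlib
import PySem

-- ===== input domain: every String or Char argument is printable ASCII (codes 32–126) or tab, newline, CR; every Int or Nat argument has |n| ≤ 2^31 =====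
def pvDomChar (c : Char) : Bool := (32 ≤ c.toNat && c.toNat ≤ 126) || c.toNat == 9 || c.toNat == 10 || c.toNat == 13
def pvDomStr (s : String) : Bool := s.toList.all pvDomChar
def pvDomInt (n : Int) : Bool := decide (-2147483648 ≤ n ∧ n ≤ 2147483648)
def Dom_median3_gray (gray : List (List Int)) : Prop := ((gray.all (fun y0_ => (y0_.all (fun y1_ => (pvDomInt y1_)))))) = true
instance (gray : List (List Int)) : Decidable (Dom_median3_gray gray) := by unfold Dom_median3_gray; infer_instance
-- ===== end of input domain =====

-- B drops A's precomputed replicate-padded array and replaces the per-window sort by a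
-- rank-counting selection (smallest window value whose rank is >= 5); objective: alternative.

-- gray[i][j] as a total lookup (indices are in range wherever the Pythons return; default 0)
def getAt (g : List (List Int)) (i j : Int) : Int :=
  PySem.List.pyGetD (PySem.List.pyGetD g i []) j 0

-- ===== PORT A =====
def padReplicate (gray : List (List Int)) (r : Int) : List (List Int) :=
  let h : Int := gray.length
  let w : Int := (gray.headD []).length
  (PySem.List.pyRange 0 (h + 2*r) 1).map (fun y =>
    let sy : Int := if y < r then 0 else if y ≥ h + r then h - 1 else y - r
    (PySem.List.pyRange 0 (w + 2*r) 1).map (fun x =>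
      let sx : Int := if x < r then 0 else if x ≥ w + r then w - 1 else x - r
      getAt gray sy sx))

def median3_gray (gray : List (List Int)) : List (List Int) :=
  let h : Int := gray.length
  let w : Int := (gray.headD []).length
  let p := padReplicate gray 1
  (PySem.List.pyRange 0 h 1).map (fun y =>
    (PySem.List.pyRange 0 w 1).map (fun x =>
      let win := (PySem.List.pyRange 0 3 1).flatMap (fun dy =>
        (PySem.List.pyRange 0 3 1).map (fun dx => getAt p (y + dy) (x + dx)))
      PySem.List.pyGetD (PySem.List.sorted win (fun v => v) false) 4 0))

-- ===== PORT B =====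
def clampI (v n : Int) : Int := if v < 0 then 0 else if v ≥ n then n - 1 else v

def median3_gray_alt (gray : List (List Int)) : List (List Int) :=
  let h : Int := gray.length
  let w : Int := (gray.headD []).length
  (PySem.List.pyRange 0 h 1).map (fun y =>
    (PySem.List.pyRange 0 w 1).map (fun x =>
      let win := (PySem.List.pyRange 0 3 1).flatMap (fun dy =>
        (PySem.List.pyRange 0 3 1).map (fun dx =>
          getAt gray (clampI (y + dy - 1) h) (clampI (x + dx - 1) w)))
      -- min over the rank-filtered window; the filter is never empty (the window's
      -- maximum has rank 9), so the default 0 is never used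
      (PySem.List.min? (win.filter (fun v => decide (5 ≤ win.countP (fun u => decide (u ≤ v)))))
        (fun v => v)).getD 0))

-- ===== PRECONDITION & SPEC =====
-- Pre_ excludes exactly the inputs where Python A raises IndexError: the empty image,
-- a first row of width 0, or some row shorter than the first row's width.
def Pre_median3_gray (gray : List (List Int)) : Prop :=
  gray ≠ [] ∧ 0 < (gray.headD []).length ∧ ∀ row ∈ gray, (gray.headD []).length ≤ row.length
instance (gray : List (List Int)) : Decidable (Pre_median3_gray gray) := by unfold Pre_median3_gray; infer_instance

def pvWitness_median3_gray : List (List Int) := [[1, 2], [3, 4]]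

def Spec_median3_gray (gray : List (List Int)) (out : List (List Int)) : Prop := out = median3_gray_alt gray
instance (gray : List (List Int)) (out : List (List Int)) : Decidable (Spec_median3_gray gray out) := by unfold Spec_median3_gray; infer_instance

-- ===== CLAIM (what is proved, stated in full; the proofs are below) =====
def Claim_equal_median3_gray : Prop := ∀ (gray : List (List Int)), Dom_median3_gray gray → Pre_median3_gray gray → Spec_median3_gray gray (median3_gray gray)

-- ===== LEMMAS AND PROOFS =====

-- looking up the replicate-padded array equals looking up the original at A's clamped indices
lemma getAt_pad (gray : List (List Int)) (Y X : Int)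
    (hY0 : 0 ≤ Y) (hY1 : Y < (gray.length : Int) + 2)
    (hX0 : 0 ≤ X) (hX1 : X < ((gray.headD []).length : Int) + 2) :
    getAt (padReplicate gray 1) Y X =
      getAt gray
        (if Y < 1 then 0 else if Y ≥ (gray.length : Int) + 1 then (gray.length : Int) - 1 else Y - 1)
        (if X < 1 then 0 else if X ≥ ((gray.headD []).length : Int) + 1 then ((gray.headD []).length : Int) - 1 else X - 1) := by
  unfold padReplicate
  simp only []
  rw [getAt, PySem.List.pyGetD_map_pyRange_of_nonneg _ _ _ _ hY0 (by omega)]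
  rw [PySem.List.pyGetD_map_pyRange_of_nonneg _ _ _ _ hX0 (by omega)]

-- A's padded-lookup index equals B's clamp, inside the relevant ranges
lemma clamp_eq (n Y : Int) :
    (if Y < 1 then 0 else if Y ≥ n + 1 then n - 1 else Y - 1) = clampI (Y - 1) n := by
  unfold clampI; split_ifs <;> omega

-- the 5th-smallest element of a 9-element list is the minimum of its rank-≥5 elements
lemma select5 (win : List Int) (h9 : win.length = 9) :
    PySem.List.pyGetD (PySem.List.sorted win (fun v => v) false) 4 0 =
      (PySem.List.min? (win.filter (fun v => decide (5 ≤ win.countP (fun u => decide (u ≤ v)))))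
        (fun v => v)).getD 0 := by
  set s := PySem.List.sorted win (fun v => v) false with hs
  have hperm : s.Perm win := PySem.List.sorted_perm win (fun v => v) false
  have hlen : s.length = 9 := by rw [hperm.length_eq, h9]
  have hpair : s.Pairwise (fun a b => a ≤ b) := PySem.List.sorted_pairwise win (fun v => v)
  have hmono : ∀ (i j : Nat) (hi : i < s.length) (hj : j < s.length), i ≤ j → s[i] ≤ s[j] := by
    intro i j hi hj hij
    rcases Nat.lt_or_ge i j with h | h
    · exact List.pairwise_iff_getElem.mp hpair i j hi hj h
    · have : i = j := le_antisymm hij h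
      subst this; exact le_refl _
  have h4 : (4 : Nat) < s.length := by omega
  set m := s[4] with hm
  -- the (total) indexing in port A returns m
  have hA : PySem.List.pyGetD s 4 0 = m := by
    have := PySem.List.pyGetD_eq_getElem (xs := s) (i := (4 : Int)) (d := 0)
      (by omega) (by omega)
    simpa using this
  rw [hA]
  -- count over win = count over s
  have hcnt : ∀ v : Int, win.countP (fun u => decide (u ≤ v)) = s.countP (fun u => decide (u ≤ v)) := by
    intro v; exact (hperm.countP_eq _).symm
  -- m has rank ≥ 5
  have hm_rank : 5 ≤ win.countP (fun u => decide (u ≤ m)) := by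
    rw [hcnt]
    have hsplit : s = s.take 5 ++ s.drop 5 := (List.take_append_drop 5 s).symm
    have htake : (s.take 5).countP (fun u => decide (u ≤ m)) = (s.take 5).length := by
      apply List.countP_eq_length.mpr
      intro u hu
      rcases List.mem_take_iff_getElem.mp hu with ⟨i, hi, rfl⟩
      simp only [decide_eq_true_eq]
      exact hmono i 4 (by omega) h4 (by omega)
    have hlen5 : (s.take 5).length = 5 := by rw [List.length_take]; omega
    calc (5 : Nat) = (s.take 5).countP (fun u => decide (u ≤ m)) := by rw [htake, hlen5]
      _ ≤ s.countP (fun u => decide (u ≤ m)) := by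
          conv_rhs => rw [hsplit]
          rw [List.countP_append]; omega
  -- any value of rank ≥ 5 is ≥ m
  have hmin : ∀ v : Int, 5 ≤ win.countP (fun u => decide (u ≤ v)) → m ≤ v := by
    intro v hv
    by_contra hlt
    push Not at hlt
    rw [hcnt] at hv
    have hsplit : s = s.take 4 ++ s.drop 4 := (List.take_append_drop 4 s).symm
    have hdrop : (s.drop 4).countP (fun u => decide (u ≤ v)) = 0 := by
      apply List.countP_eq_zero.mpr
      intro u hu
      rcases List.mem_drop_iff_getElem.mp hu with ⟨i, hi, rfl⟩
      simp only [decide_eq_true_eq, not_le]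
      have : m ≤ s[4 + i] := hmono 4 (4 + i) h4 (by omega) (by omega)
      omega
    have : s.countP (fun u => decide (u ≤ v)) ≤ 4 := by
      conv_lhs => rw [hsplit]
      rw [List.countP_append, hdrop]
      have := List.countP_le_length (l := s.take 4) (p := fun u => decide (u ≤ v))
      rw [List.length_take] at this
      omega
    omega
  -- m is in the filtered list
  have hm_mem : m ∈ win.filter (fun v => decide (5 ≤ win.countP (fun u => decide (u ≤ v)))) := by
    apply List.mem_filter.mpr
    exact ⟨hperm.mem_iff.mp (s.getElem_mem h4), by simpa using hm_rank⟩
  -- hence min? is some z with z = m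
  cases hmin? : PySem.List.min? (win.filter (fun v => decide (5 ≤ win.countP (fun u => decide (u ≤ v))))) (fun v => v) with
  | none =>
      have hnil := (PySem.List.min?_eq_none_iff _ _).mp hmin?
      rw [hnil] at hm_mem
      exact absurd hm_mem (List.not_mem_nil)
  | some z =>
      have hz_mem := PySem.List.min?_mem hmin?
      have hz_le : z ≤ m := PySem.List.min?_isMin hmin? m hm_mem
      have hz_filter := List.mem_filter.mp hz_mem
      have hz_ge : m ≤ z := hmin z (by simpa using hz_filter.2)
      simp [le_antisymm hz_le hz_ge]

-- ===== VERDICT (by name: the statement is the Claim_ definition above) =====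
theorem median3_gray_spec : Claim_equal_median3_gray := by
  intro gray _ _
  unfold Spec_median3_gray median3_gray median3_gray_alt
  simp only []
  apply List.map_congr_left
  intro y hy
  rw [PySem.List.mem_pyRange_one] at hy
  apply List.map_congr_left
  intro x hx
  rw [PySem.List.mem_pyRange_one] at hx
  have hr3 : PySem.List.pyRange 0 3 1 = [0, 1, 2] := by decide
  have hwin :
      (PySem.List.pyRange 0 3 1).flatMap (fun dy =>
        (PySem.List.pyRange 0 3 1).map (fun dx => getAt (padReplicate gray 1) (y + dy) (x + dx))) =
      (PySem.List.pyRange 0 3 1).flatMap (fun dy =>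
        (PySem.List.pyRange 0 3 1).map (fun dx =>
          getAt gray (clampI (y + dy - 1) (gray.length : Int))
                     (clampI (x + dx - 1) ((gray.headD []).length : Int)))) := by
    apply List.flatMap_congr
    intro dy hdy
    rw [PySem.List.mem_pyRange_one] at hdy
    apply List.map_congr_left
    intro dx hdx
    rw [PySem.List.mem_pyRange_one] at hdx
    rw [getAt_pad gray (y + dy) (x + dx) (by omega) (by omega) (by omega) (by omega)]
    rw [clamp_eq, clamp_eq]
  rw [hwin]
  apply select5
  rw [hr3]
  simp
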